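-- pv_equiv track=rewrite | github.com/amidos2006/gym-pcgrl | gym_pcgrl/envs/helper.py | get_type_grouping
-- ===== SOURCE A (Python) =====
-- def _calc_group_value(map, x, y, types, relLocs):
--     result = 0
--     for l in relLocs:
--         nx, ny = x+l[0], y+l[1]
--         if nx < 0 or ny < 0 or nx >= len(map[0]) or ny >= len(map):
--             continue
--         if map[ny][nx] in types:
--             result += 1
--     return result
--
-- def get_type_grouping(map, types, relLocs, min, max):
--     result = 0
--     for y in range(len(map)):
--         for x in range(len(map[y])):
--             if map[y][x] in types:
--                 value = _calc_group_value(map, x, y, types, relLocs)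
--                 if value >= min and value <= max:
--                     result += 1
--     return result
-- ===== SOURCE B (Python) =====
-- def get_type_grouping(map, types, relLocs, min, max):
--     # Scatter/gather inversion: instead of probing each cell's neighbors (gather),
--     # every typed cell scatters one contribution to each cell at the INVERSE offset;
--     # a cell's group value is then just its accumulated tally.
--     typed = [(x, y) for y, row in enumerate(map) for x, v in enumerate(row) if v in types]
--     counts = {}
--     for (u, v) in typed:
--         for l in relLocs:
--             c = (u - l[0], v - l[1])
--             counts[c] = counts.get(c, 0) + 1
--     return sum(1 for c in typed if min <= counts.get(c, 0) <= max)
-- ===== Notes on version B (the rewrite author's own statement) =====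
-- stated objective: alternative
-- what changed: B inverts A's gather into a scatter: instead of probing each cell's neighbors against the grid with bounds checks, every typed cell adds one contribution to a dict keyed by the inverse-offset coordinate, and each typed cell's group value is read off that accumulated tally.
-- outside the precondition, e.g. on get_type_grouping([[1], [1, 1]], [1], [[1, 0]], 1, 9): A returns 0, B returns 1; on get_type_grouping([[1, 1], [1]], [1], [[1, 0]], 0, 9): A raises IndexError, B returns 3
import Mathlib
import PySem

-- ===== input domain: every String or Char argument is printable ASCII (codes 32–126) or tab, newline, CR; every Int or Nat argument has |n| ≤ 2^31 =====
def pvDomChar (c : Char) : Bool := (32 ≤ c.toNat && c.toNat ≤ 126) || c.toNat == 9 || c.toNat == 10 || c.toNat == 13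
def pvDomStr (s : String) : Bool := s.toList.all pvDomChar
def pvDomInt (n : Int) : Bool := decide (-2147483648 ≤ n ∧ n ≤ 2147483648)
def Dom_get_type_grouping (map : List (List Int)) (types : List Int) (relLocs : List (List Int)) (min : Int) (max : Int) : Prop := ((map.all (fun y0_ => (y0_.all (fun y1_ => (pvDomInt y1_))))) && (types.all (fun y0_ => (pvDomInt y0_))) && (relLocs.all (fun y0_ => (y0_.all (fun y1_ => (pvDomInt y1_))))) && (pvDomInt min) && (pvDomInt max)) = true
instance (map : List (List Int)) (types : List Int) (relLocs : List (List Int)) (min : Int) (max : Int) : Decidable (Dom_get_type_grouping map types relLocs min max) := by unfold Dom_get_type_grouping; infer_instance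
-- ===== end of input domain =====

-- B inverts A's per-cell neighbor probing (gather) into a scatter: each typed cell adds one
-- contribution to a dict keyed by the inverse-offset coordinate, and a cell's group value is
-- read off that tally (objective: alternative).

-- ===== PORT A =====
-- `_calc_group_value`; the pyGetD defaults are only reached where Python raises, which Pre_ excludes
def pvCalcGroupValue (map : List (List Int)) (x y : Int) (types : List Int) (relLocs : List (List Int)) : Int :=
  relLocs.foldl (fun result l =>
    let nx := x + PySem.List.pyGetD l 0 0
    let ny := y + PySem.List.pyGetD l 1 0
    if nx < 0 ∨ ny < 0 ∨ nx ≥ ((PySem.List.pyGetD map 0 []).length : Int) ∨ ny ≥ (map.length : Int) then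
      result
    else if types.contains (PySem.List.pyGetD (PySem.List.pyGetD map ny []) nx 0) then
      result + 1
    else
      result) 0

def get_type_grouping (map : List (List Int)) (types : List Int) (relLocs : List (List Int)) (min : Int) (max : Int) : Int :=
  (PySem.List.pyRange 0 (map.length : Int) 1).foldl (fun result y =>
    let row := PySem.List.pyGetD map y []
    (PySem.List.pyRange 0 (row.length : Int) 1).foldl (fun result x =>
      if types.contains (PySem.List.pyGetD row x 0) then
        let value := pvCalcGroupValue map x y types relLocs
        if value ≥ min ∧ value ≤ max then result + 1 else result
      else result) result) 0

-- ===== PORT B =====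
-- the list comprehension `typed`, the scatter double loop into the counts dict, and the final sum
def get_type_grouping_alt (map : List (List Int)) (types : List Int) (relLocs : List (List Int)) (min : Int) (max : Int) : Int :=
  let typed := (PySem.List.enumerate map 0).flatMap (fun yrow =>
    ((PySem.List.enumerate yrow.2 0).filter (fun xv => types.contains xv.2)).map (fun xv => (xv.1, yrow.1)))
  let counts := typed.foldl (fun d p => relLocs.foldl (fun d l =>
    PySem.Dict.modify d (p.1 - PySem.List.pyGetD l 0 0, p.2 - PySem.List.pyGetD l 1 0) 0 (· + 1)) d) PySem.Dict.empty
  typed.foldl (fun r c =>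
    if min ≤ PySem.Dict.getD counts c 0 ∧ PySem.Dict.getD counts c 0 ≤ max then r + 1 else r) 0

-- ===== PRECONDITION & SPEC =====
-- When some typed cell exists, Pre_ excludes (a) non-rectangular maps: on rows shorter than
-- row 0, A raises IndexError in `_calc_group_value`, and on rows longer than row 0, A's bounds
-- check against len(map[0]) skips typed neighbor cells that exist — an artefact of its
-- implementation (see cites); and (b) relLocs entries of length < 2, on which both A and B
-- raise IndexError. Maps with no typed cell are all admitted.
def Pre_get_type_grouping (map : List (List Int)) (types : List Int) (relLocs : List (List Int)) (min : Int) (max : Int) : Prop :=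
  (∀ row ∈ map, ∀ v ∈ row, v ∉ types) ∨
  ((∀ row ∈ map, row.length = (map.headD []).length) ∧ (∀ l ∈ relLocs, 2 ≤ l.length))
instance (map : List (List Int)) (types : List Int) (relLocs : List (List Int)) (min : Int) (max : Int) : Decidable (Pre_get_type_grouping map types relLocs min max) := by unfold Pre_get_type_grouping; infer_instance

def pvWitness_get_type_grouping : List (List Int) × List Int × List (List Int) × Int × Int :=
  ([[1, 0], [0, 1]], [1], [[0, 1], [1, 0]], 0, 4)

def Spec_get_type_grouping (map : List (List Int)) (types : List Int) (relLocs : List (List Int)) (min : Int) (max : Int) (out : Int) : Prop := out = get_type_grouping_alt map types relLocs min max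
instance (map : List (List Int)) (types : List Int) (relLocs : List (List Int)) (min : Int) (max : Int) (out : Int) : Decidable (Spec_get_type_grouping map types relLocs min max out) := by unfold Spec_get_type_grouping; infer_instance

-- ===== CLAIM (what is proved, stated in full; the proofs are below) =====
def Claim_equal_get_type_grouping : Prop := ∀ (map : List (List Int)) (types : List Int) (relLocs : List (List Int)) (min : Int) (max : Int), Dom_get_type_grouping map types relLocs min max → Pre_get_type_grouping map types relLocs min max → Spec_get_type_grouping map types relLocs min max (get_type_grouping map types relLocs min max)

-- ===== LEMMAS AND PROOFS =====

-- the list of typed-cell coordinates (x, y) — B's `typed`, in its construction order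
def pvSeg (types : List Int) (yrow : Int × List Int) : List (Int × Int) :=
  ((PySem.List.enumerate yrow.2 0).filter (fun xv => types.contains xv.2)).map (fun xv => (xv.1, yrow.1))

def pvL (map : List (List Int)) (types : List Int) : List (Int × Int) :=
  (PySem.List.enumerate map 0).flatMap (pvSeg types)

-- the scattered contribution targets of one typed cell
def pvScat (relLocs : List (List Int)) (p : Int × Int) : List (Int × Int) :=
  relLocs.map (fun l => (p.1 - PySem.List.pyGetD l 0 0, p.2 - PySem.List.pyGetD l 1 0))

lemma pv_cast_sum (l : List Int) (c : Int → Nat) :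
    ((l.map (fun y => ((c y : Nat) : Int))).sum) = (((l.map c).sum : Nat) : Int) := by
  induction l with
  | nil => simp
  | cons x xs ih => simp [ih]

lemma pv_countP_flatMap {α β : Type} (l : List α) (f : α → List β) (p : β → Bool) :
    (l.flatMap f).countP p = (l.map (fun a => (f a).countP p)).sum := by
  induction l with
  | nil => simp
  | cons x xs ih => simp [List.flatMap_cons, List.countP_append, ih]

-- membership in pvL (rectangular map)
lemma pv_mem_L (map : List (List Int)) (types : List Int)
    (hrect : ∀ row ∈ map, row.length = (map.headD []).length) (a b : Int) :
    (a, b) ∈ pvL map types ↔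
      0 ≤ b ∧ b < (map.length : Int) ∧ 0 ≤ a ∧ a < ((map.headD []).length : Int) ∧
      types.contains (PySem.List.pyGetD (PySem.List.pyGetD map b []) a 0) := by
  unfold pvL pvSeg
  rw [List.mem_flatMap]
  constructor
  · rintro ⟨yr, hyr, hseg⟩
    obtain ⟨k, hk, rfl⟩ := (PySem.List.mem_enumerate_iff map 0 yr).mp hyr
    obtain ⟨xv, hxv, heq⟩ := List.mem_map.mp hseg
    obtain ⟨hxv1, hxv2⟩ := List.mem_filter.mp hxv
    obtain ⟨j, hj, rfl⟩ := (PySem.List.mem_enumerate_iff _ 0 xv).mp hxv1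
    simp only [Prod.mk.injEq] at heq
    obtain ⟨h1, h2⟩ := heq
    subst h1; subst h2
    have hw := hrect map[k] (List.getElem_mem hk)
    refine ⟨by omega, by simp; omega, by omega, by rw [← hw]; simp; omega, ?_⟩
    simp only [zero_add]
    rw [show ((0:Int) + k) = ((k:Nat):Int) by omega] at *
    rw [PySem.List.pyGetD_natCast map k [], List.getD_eq_getElem _ _ hk,
        PySem.List.pyGetD_natCast, List.getD_eq_getElem _ _ hj]
    exact hxv2
  · rintro ⟨hb0, hbH, ha0, haW, hty⟩
    set k := b.toNat with hkdef
    have hk : k < map.length := by omega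
    refine ⟨(↑k, map[k]), (PySem.List.mem_enumerate_iff map 0 _).mpr ⟨k, hk, by simp⟩, ?_⟩
    have hw := hrect map[k] (List.getElem_mem hk)
    set j := a.toNat with hjdef
    have hj : j < (map[k]).length := by rw [hw]; omega
    apply List.mem_map.mpr
    refine ⟨(↑j, map[k][j]), List.mem_filter.mpr ⟨(PySem.List.mem_enumerate_iff _ 0 _).mpr ⟨j, hj, by simp⟩, ?_⟩, by simp only [Prod.mk.injEq]; constructor <;> omega⟩
    have : PySem.List.pyGetD (PySem.List.pyGetD map b []) a 0 = map[k][j] := by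
      rw [show b = ((k:Nat):Int) by omega, PySem.List.pyGetD_natCast,
          show a = ((j:Nat):Int) by omega, PySem.List.pyGetD_natCast,
          List.getD_eq_getElem _ _ hk, List.getD_eq_getElem _ _ hj]
    rwa [this] at hty

-- pvL has no duplicate coordinates
lemma pv_nodup_seg (types : List Int) (yrow : Int × List Int) : (pvSeg types yrow).Nodup := by
  unfold pvSeg
  have h1 : ((PySem.List.enumerate yrow.2 0).filter (fun xv => types.contains xv.2)).Pairwise
      (fun p q => p.1 < q.1) :=
    List.Pairwise.filter _ (PySem.List.pairwise_lt_enumerate yrow.2 0)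
  have h2 : (((PySem.List.enumerate yrow.2 0).filter (fun xv => types.contains xv.2)).map
      (fun xv => ((xv.1, yrow.1) : Int × Int))).Pairwise (· ≠ ·) := by
    rw [List.pairwise_map]
    exact h1.imp (by rintro a b hlt h; injection h with h1' _; omega)
  exact h2

lemma pv_nodup_L (map : List (List Int)) (types : List Int) : (pvL map types).Nodup := by
  unfold pvL
  apply List.nodup_flatMap.mpr
  refine ⟨fun yrow _ => pv_nodup_seg types yrow, ?_⟩
  apply (PySem.List.pairwise_lt_enumerate map 0).imp
  intro a b hlt x hxa hxb
  obtain ⟨u, -, rfl⟩ := List.mem_map.mp hxa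
  obtain ⟨v, -, hv⟩ := List.mem_map.mp hxb
  injection hv with _ h2
  omega

-- getD of the scatter double loop
lemma pv_getD_scatter (relLocs : List (List Int)) (typed : List (Int × Int)) :
    ∀ (d : PySem.Dict (Int × Int) Int) (c : Int × Int),
    PySem.Dict.getD (typed.foldl (fun d p => relLocs.foldl (fun d l =>
      PySem.Dict.modify d (p.1 - PySem.List.pyGetD l 0 0, p.2 - PySem.List.pyGetD l 1 0) 0 (· + 1)) d) d) c 0
    = PySem.Dict.getD d c 0 + ((typed.flatMap (pvScat relLocs)).count c : Int) := by
  induction typed with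
  | nil => intro d c; simp
  | cons p rest ih =>
    intro d c
    simp only [List.foldl_cons, List.flatMap_cons, List.count_append]
    rw [ih]
    have hinner : relLocs.foldl (fun d l =>
        PySem.Dict.modify d (p.1 - PySem.List.pyGetD l 0 0, p.2 - PySem.List.pyGetD l 1 0) 0 (· + 1)) d
      = (pvScat relLocs p).foldl (fun d x => PySem.Dict.modify d x 0 (· + 1)) d := by
      unfold pvScat; rw [List.foldl_map]
    rw [hinner, PySem.Dict.getD_foldl_modify_add_one]
    push_cast
    ring

-- the tally at c equals the number of offsets whose target from c is typed
lemma pv_sum_ite {β : Type} (l : List β) (p : β → Bool) :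
    (l.map (fun x => if p x then 1 else 0)).sum = l.countP p := by
  induction l with
  | nil => simp
  | cons x xs ih => by_cases h : p x <;> simp [h, ih] <;> try omega

lemma pv_sum_ite_prop {β : Type} (l : List β) (p : β → Prop) [DecidablePred p] :
    (l.map (fun x => if p x then 1 else 0)).sum = l.countP (fun x => decide (p x)) := by
  induction l with
  | nil => simp
  | cons x xs ih => by_cases h : p x <;> simp [h, ih] <;> try omega

lemma pv_sum_swap {α β : Type} (as : List α) (bs : List β) (P : α → β → Bool) :
    (as.map (fun a => bs.countP (P a))).sum = (bs.map (fun b => as.countP (fun a => P a b))).sum := by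
  induction as with
  | nil => simp
  | cons a as' ih =>
    simp only [List.map_cons, List.sum_cons, ih, List.countP_cons]
    have : (bs.map (fun b => as'.countP (fun a => P a b) + if P a b then 1 else 0)).sum
        = (bs.map (fun b => as'.countP (fun a => P a b))).sum + (bs.map (fun b => if P a b then 1 else 0)).sum :=
      List.sum_map_add
    rw [this, pv_sum_ite]
    omega

lemma pv_count_scatter (map : List (List Int)) (types : List Int) (relLocs : List (List Int)) (c : Int × Int) :
    (((pvL map types).flatMap (pvScat relLocs)).count c : Int)
    = ((relLocs.countP (fun l =>
        decide ((c.1 + PySem.List.pyGetD l 0 0, c.2 + PySem.List.pyGetD l 1 0) ∈ pvL map types)) : Nat) : Int) := by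
  have hnd := pv_nodup_L map types
  congr 1
  rw [List.count_eq_countP, pv_countP_flatMap]
  have hstep : ∀ p : Int × Int, (pvScat relLocs p).countP (· == c)
      = relLocs.countP (fun l => p == (c.1 + PySem.List.pyGetD l 0 0, c.2 + PySem.List.pyGetD l 1 0)) := by
    intro p
    unfold pvScat
    rw [List.countP_map]
    apply List.countP_congr
    intro l _
    simp only [Function.comp, beq_iff_eq, Prod.ext_iff]
    constructor <;> (intro h; constructor <;> omega)
  calc ((pvL map types).map (fun p => (pvScat relLocs p).countP (· == c))).sum
      = ((pvL map types).map (fun p => relLocs.countP (fun l =>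
          p == (c.1 + PySem.List.pyGetD l 0 0, c.2 + PySem.List.pyGetD l 1 0)))).sum := by
        exact congrArg List.sum (List.map_congr_left (fun p _ => hstep p))
    _ = (relLocs.map (fun l => (pvL map types).countP (fun p =>
          p == (c.1 + PySem.List.pyGetD l 0 0, c.2 + PySem.List.pyGetD l 1 0)))).sum := by
        exact pv_sum_swap (pvL map types) relLocs _
    _ = (relLocs.map (fun l =>
          if (c.1 + PySem.List.pyGetD l 0 0, c.2 + PySem.List.pyGetD l 1 0) ∈ pvL map types then 1 else 0)).sum := by
        apply congrArg List.sum
        apply List.map_congr_left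
        intro l _
        by_cases hm : (c.1 + PySem.List.pyGetD l 0 0, c.2 + PySem.List.pyGetD l 1 0) ∈ pvL map types
        · rw [if_pos hm]
          exact List.count_eq_one_of_mem hnd hm
        · rw [if_neg hm]
          exact List.count_eq_zero_of_not_mem hm
    _ = relLocs.countP (fun l =>
          decide ((c.1 + PySem.List.pyGetD l 0 0, c.2 + PySem.List.pyGetD l 1 0) ∈ pvL map types)) :=
        pv_sum_ite_prop relLocs _

-- ===== A's counting layer (per-cell values) =====
lemma pv_A_eq (map : List (List Int)) (types : List Int) (relLocs : List (List Int)) (min max : Int) :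
    get_type_grouping map types relLocs min max
    = ((pvL map types).countP (fun p => decide (pvCalcGroupValue map p.1 p.2 types relLocs ≥ min ∧ pvCalcGroupValue map p.1 p.2 types relLocs ≤ max)) : Int) := by
  unfold get_type_grouping
  rw [PySem.List.foldl_congr_mem _ _
    (fun result y => result +
      (((PySem.List.pyRange 0 ((PySem.List.pyGetD map y []).length : Int) 1).countP
        (fun x => decide (types.contains (PySem.List.pyGetD (PySem.List.pyGetD map y []) x 0) = true ∧
          pvCalcGroupValue map x y types relLocs ≥ min ∧ pvCalcGroupValue map x y types relLocs ≤ max)) : Nat) : Int)) 0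
     ?_]
  · rw [PySem.List.foldl_add, zero_add, pv_cast_sum]
    congr 1
    unfold pvL
    rw [pv_countP_flatMap]
    rw [PySem.List.enumerate_eq_map_pyRange map [], List.map_map]
    simp only [PySem.List.len]
    congr 1
    apply List.map_congr_left
    intro y hy
    unfold pvSeg
    dsimp only [Function.comp]
    rw [List.countP_map, List.countP_filter,
        PySem.List.enumerate_eq_map_pyRange _ (0 : Int), List.countP_map]
    apply List.countP_congr
    intro x hx
    simp only [Function.comp, decide_eq_true_eq, Bool.and_eq_true]
    constructor
    · rintro ⟨ht, hr⟩
      exact ⟨hr, ht⟩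
    · rintro ⟨hr, ht⟩
      exact ⟨ht, hr⟩
  · intro acc y _
    rw [PySem.List.foldl_congr_mem _ _
      (fun result x => if types.contains (PySem.List.pyGetD (PySem.List.pyGetD map y []) x 0) = true ∧
          pvCalcGroupValue map x y types relLocs ≥ min ∧ pvCalcGroupValue map x y types relLocs ≤ max
        then result + 1 else result) acc ?_]
    · exact PySem.List.foldl_ite_add_one _ _ _
    · intro acc' x _
      dsimp only
      split_ifs <;> tauto

lemma pv_width_eq (map : List (List Int)) :
    (PySem.List.pyGetD map 0 []).length = (map.headD []).length := by
  cases map <;> simp [PySem.List.pyGetD_zero]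

-- A's per-cell gather equals the countP over offsets landing on typed cells
lemma pv_agree (map : List (List Int)) (types : List Int) (relLocs : List (List Int))
    (hrect : ∀ row ∈ map, row.length = (map.headD []).length) (p : Int × Int) :
    pvCalcGroupValue map p.1 p.2 types relLocs
    = ((relLocs.countP (fun l =>
        decide ((p.1 + PySem.List.pyGetD l 0 0, p.2 + PySem.List.pyGetD l 1 0) ∈ pvL map types)) : Nat) : Int) := by
  unfold pvCalcGroupValue
  rw [PySem.List.foldl_congr_mem _ _
    (fun result l => if 0 ≤ p.1 + PySem.List.pyGetD l 0 0 ∧ 0 ≤ p.2 + PySem.List.pyGetD l 1 0 ∧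
        p.1 + PySem.List.pyGetD l 0 0 < ((PySem.List.pyGetD map 0 []).length : Int) ∧
        p.2 + PySem.List.pyGetD l 1 0 < (map.length : Int) ∧
        types.contains (PySem.List.pyGetD (PySem.List.pyGetD map (p.2 + PySem.List.pyGetD l 1 0) [])
          (p.1 + PySem.List.pyGetD l 0 0) 0) = true
      then result + 1 else result) 0 ?_]
  · rw [PySem.List.foldl_ite_add_one, zero_add]
    congr 1
    apply List.countP_congr
    intro l _
    rw [Bool.eq_iff_iff]
    simp only [decide_eq_true_eq, iff_true]
    rw [pv_mem_L map types hrect, pv_width_eq]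
    constructor
    · rintro ⟨h1, h2, h3, h4, ht⟩
      exact ⟨h2, h4, h1, h3, ht⟩
    · rintro ⟨h1, h2, h3, h4, ht⟩
      exact ⟨h3, h1, h4, h2, ht⟩
  · intro acc l _
    dsimp only
    by_cases hc : p.1 + PySem.List.pyGetD l 0 0 < 0 ∨ p.2 + PySem.List.pyGetD l 1 0 < 0 ∨
        p.1 + PySem.List.pyGetD l 0 0 ≥ ((PySem.List.pyGetD map 0 []).length : Int) ∨
        p.2 + PySem.List.pyGetD l 1 0 ≥ (map.length : Int)
    · rw [if_pos hc, if_neg]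
      rintro ⟨a1, a2, a3, a4, -⟩
      omega
    · rw [if_neg hc]
      by_cases ht : types.contains (PySem.List.pyGetD (PySem.List.pyGetD map (p.2 + PySem.List.pyGetD l 1 0) [])
          (p.1 + PySem.List.pyGetD l 0 0) 0) = true
      · rw [if_pos ht, if_pos]
        exact ⟨by omega, by omega, by omega, by omega, ht⟩
      · rw [if_neg ht, if_neg]
        rintro ⟨-, -, -, -, h⟩
        exact ht h

lemma pv_L_nil (map : List (List Int)) (types : List Int)
    (h : ∀ row ∈ map, ∀ v ∈ row, v ∉ types) : pvL map types = [] := by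
  unfold pvL pvSeg
  apply List.flatMap_eq_nil_iff.mpr
  intro yrow hyr
  obtain ⟨k, hk, rfl⟩ := (PySem.List.mem_enumerate_iff map 0 yrow).mp hyr
  have : (PySem.List.enumerate map[k] 0).filter (fun xv => types.contains xv.2) = [] := by
    apply List.filter_eq_nil_iff.mpr
    intro xv hxv
    obtain ⟨j, hj, rfl⟩ := (PySem.List.mem_enumerate_iff map[k] 0 xv).mp hxv
    simp only [List.contains_eq_mem, decide_eq_true_eq]
    exact fun hmem => h map[k] (List.getElem_mem hk) map[k][j] (List.getElem_mem hj) hmem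
  rw [this, List.map_nil]

theorem pv_main (map : List (List Int)) (types : List Int) (relLocs : List (List Int)) (min max : Int)
    (hrect : ∀ row ∈ map, row.length = (map.headD []).length) :
    get_type_grouping map types relLocs min max = get_type_grouping_alt map types relLocs min max := by
  rw [pv_A_eq]
  unfold get_type_grouping_alt
  have htyped : (PySem.List.enumerate map 0).flatMap (fun yrow =>
      ((PySem.List.enumerate yrow.2 0).filter (fun xv => types.contains xv.2)).map (fun xv => (xv.1, yrow.1)))
    = pvL map types := rfl
  rw [htyped]
  rw [PySem.List.foldl_congr_mem _ _
    (fun r c => if min ≤ pvCalcGroupValue map c.1 c.2 types relLocs ∧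
        pvCalcGroupValue map c.1 c.2 types relLocs ≤ max then r + 1 else r) 0 ?_]
  · rw [PySem.List.foldl_ite_add_one, zero_add]
  · intro acc c _
    have : PySem.Dict.getD ((pvL map types).foldl (fun d p => relLocs.foldl (fun d l =>
        PySem.Dict.modify d (p.1 - PySem.List.pyGetD l 0 0, p.2 - PySem.List.pyGetD l 1 0) 0 (· + 1)) d)
        PySem.Dict.empty) c 0 = pvCalcGroupValue map c.1 c.2 types relLocs := by
      rw [pv_getD_scatter, PySem.Dict.getD_empty, zero_add, pv_count_scatter, pv_agree map types relLocs hrect]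
    simp only [this]

-- ===== VERDICT (by name: the statement is the Claim_ definition above) =====
theorem get_type_grouping_spec : Claim_equal_get_type_grouping := by
  intro map types relLocs min max _ hpre
  unfold Spec_get_type_grouping
  rcases hpre with hempty | ⟨hrect, -⟩
  · have hnil := pv_L_nil map types hempty
    rw [pv_A_eq, hnil]
    unfold get_type_grouping_alt
    have htyped : (PySem.List.enumerate map 0).flatMap (fun yrow =>
        ((PySem.List.enumerate yrow.2 0).filter (fun xv => types.contains xv.2)).map (fun xv => (xv.1, yrow.1)))
      = pvL map types := rfl
    rw [htyped, hnil]
    simp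
  · exact pv_main map types relLocs min max hrect
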